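-- pv_equiv track=rewrite | github.com/sean578/advent_of_code | 2021/day_23.py | find_blocking_pos
-- ===== SOURCE A (Python) =====
-- def find_blocking_pos(hallway_pos, amphipod):
--     x, _ = amphipod
--     sb = 11  # Smallest blocking above room x
--     lb = -1  # Largest blocking below room x
--     for hp in hallway_pos:
--         if x < hp < sb:
--             sb = hp
--         elif lb < hp < x:
--             lb = hp
--
--     return lb, sb
-- ===== SOURCE B (Python) =====
-- import bisect
--
-- def find_blocking_pos(hallway_pos, amphipod):
--     # Sort the occupied positions (excluding x itself) once, then binary-search
--     # for x's insertion point: the neighbour below is lb, the neighbour above is sb,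
--     # with the hallway ends -1 / 11 as defaults.
--     x = amphipod[0]
--     ys = sorted(hp for hp in hallway_pos if hp != x)
--     i = bisect.bisect_left(ys, x)
--     lb = ys[i - 1] if i > 0 and ys[i - 1] > -1 else -1
--     sb = ys[i] if i < len(ys) and ys[i] < 11 else 11
--     return lb, sb
-- ===== Notes on version B (the rewrite author's own statement) =====
-- stated objective: alternative
-- what changed: A's single min/max-tracking pass is replaced by sorting the positions other than x once and binary-searching (bisect_left) for x's insertion point, reading the neighbour below as lb and the neighbour above as sb with the -1/11 hallway-end defaults.
import Mathlib
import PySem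

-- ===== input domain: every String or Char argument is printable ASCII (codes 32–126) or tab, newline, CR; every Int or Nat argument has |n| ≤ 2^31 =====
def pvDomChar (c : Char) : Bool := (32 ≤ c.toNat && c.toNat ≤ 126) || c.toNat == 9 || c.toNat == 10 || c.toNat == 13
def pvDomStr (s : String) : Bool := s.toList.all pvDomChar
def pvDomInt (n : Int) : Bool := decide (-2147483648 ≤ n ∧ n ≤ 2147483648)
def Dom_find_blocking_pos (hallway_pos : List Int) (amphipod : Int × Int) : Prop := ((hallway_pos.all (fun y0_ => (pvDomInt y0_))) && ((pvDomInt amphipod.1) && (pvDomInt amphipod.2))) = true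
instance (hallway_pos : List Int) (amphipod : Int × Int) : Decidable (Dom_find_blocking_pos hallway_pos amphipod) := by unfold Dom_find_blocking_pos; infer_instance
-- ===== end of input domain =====

-- B replaces A's min/max-tracking linear pass by sort-then-binary-search (alternative decomposition, not faster).

-- ===== PORT A =====
def find_blocking_pos (hallway_pos : List Int) (amphipod : Int × Int) : Int × Int :=
  let x := amphipod.1
  hallway_pos.foldl (fun (s : Int × Int) hp =>
      if x < hp ∧ hp < s.2 then (s.1, hp)
      else if s.1 < hp ∧ hp < x then (hp, s.2)
      else s) ((-1 : Int), (11 : Int))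

-- ===== PORT B =====
def find_blocking_pos_alt (hallway_pos : List Int) (amphipod : Int × Int) : Int × Int :=
  let x := amphipod.1
  let ys := PySem.List.sorted (hallway_pos.filter (fun hp => hp ≠ x)) (fun v => v)
  let i := PySem.List.bisectLeft ys x
  let lb := if 0 < i ∧ -1 < ys.getD (i - 1) 0 then ys.getD (i - 1) 0 else -1
  let sb := if i < ys.length ∧ ys.getD i 0 < 11 then ys.getD i 0 else 11
  (lb, sb)

-- ===== PRECONDITION & SPEC =====
def Spec_find_blocking_pos (hallway_pos : List Int) (amphipod : Int × Int) (out : Int × Int) : Prop := out = find_blocking_pos_alt hallway_pos amphipod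
instance (hallway_pos : List Int) (amphipod : Int × Int) (out : Int × Int) : Decidable (Spec_find_blocking_pos hallway_pos amphipod out) := by unfold Spec_find_blocking_pos; infer_instance

-- ===== CLAIM (what is proved, stated in full; the proofs are below) =====
def Claim_equal_find_blocking_pos : Prop := ∀ (hallway_pos : List Int) (amphipod : Int × Int), Dom_find_blocking_pos hallway_pos amphipod → Spec_find_blocking_pos hallway_pos amphipod (find_blocking_pos hallway_pos amphipod)

-- ===== LEMMAS AND PROOFS =====

-- A's fold decomposes into two independent folds (max-tracking below x, min-tracking above x).
theorem foldA_split (x : Int) : ∀ (l : List Int) (lb sb : Int),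
    l.foldl (fun (s : Int × Int) hp =>
      if x < hp ∧ hp < s.2 then (s.1, hp)
      else if s.1 < hp ∧ hp < x then (hp, s.2)
      else s) (lb, sb)
    = (l.foldl (fun a hp => if hp < x then max a hp else a) lb,
       l.foldl (fun b hp => if x < hp then min b hp else b) sb) := by
  intro l
  induction l with
  | nil => intro lb sb; rfl
  | cons hp t ih =>
    intro lb sb
    simp only [List.foldl_cons]
    have hstep : (if x < hp ∧ hp < sb then (lb, hp)
        else if lb < hp ∧ hp < x then (hp, sb) else (lb, sb))
        = ((if hp < x then max lb hp else lb), (if x < hp then min sb hp else sb)) := by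
      split_ifs <;> simp_all <;> omega
    rw [hstep, ih]

theorem foldl_max_le (l : List Int) (a : Int) (h : ∀ y ∈ l, y ≤ a) :
    l.foldl max a = a := by
  induction l generalizing a with
  | nil => rfl
  | cons hd t ih =>
    simp only [List.foldl_cons]
    have h1 : hd ≤ a := h hd (by simp)
    rw [max_eq_left h1]
    exact ih a (fun y hy => h y (by simp [hy]))

theorem foldl_max_mem_ub (l : List Int) (a m : Int) (hm : m ∈ l) (hub : ∀ y ∈ l, y ≤ m) :
    l.foldl max a = max a m := by
  induction l generalizing a with
  | nil => cases hm
  | cons hd t ih =>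
    simp only [List.foldl_cons]
    by_cases hmt : m ∈ t
    · rw [ih (max a hd) hmt (fun y hy => hub y (by simp [hy]))]
      have : hd ≤ m := hub hd (by simp)
      omega
    · have hdm : m = hd := by
        rcases List.mem_cons.mp hm with h | h
        · exact h
        · exact absurd h hmt
      subst hdm
      rw [foldl_max_le t (max a m) (fun y hy => by
        have := hub y (by simp [hy]); omega)]

theorem foldl_min_ge (l : List Int) (b : Int) (h : ∀ y ∈ l, b ≤ y) :
    l.foldl min b = b := by
  induction l generalizing b with
  | nil => rfl
  | cons hd t ih =>
    simp only [List.foldl_cons]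
    have h1 : b ≤ hd := h hd (by simp)
    rw [min_eq_left h1]
    exact ih b (fun y hy => h y (by simp [hy]))

theorem foldl_min_mem_lb (l : List Int) (b m : Int) (hm : m ∈ l) (hlb : ∀ y ∈ l, m ≤ y) :
    l.foldl min b = min b m := by
  induction l generalizing b with
  | nil => cases hm
  | cons hd t ih =>
    simp only [List.foldl_cons]
    by_cases hmt : m ∈ t
    · rw [ih (min b hd) hmt (fun y hy => hlb y (by simp [hy]))]
      have : m ≤ hd := hlb hd (by simp)
      omega
    · have hdm : m = hd := by
        rcases List.mem_cons.mp hm with h | h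
        · exact h
        · exact absurd h hmt
      subst hdm
      rw [foldl_min_ge t (min b m) (fun y hy => by
        have := hlb y (by simp [hy]); omega)]

-- elements equal to x are inert for both component folds
theorem foldl_maxIf_filter (x : Int) (l : List Int) (a : Int) :
    l.foldl (fun a hp => if hp < x then max a hp else a) a
    = (l.filter (fun hp => hp ≠ x)).foldl (fun a hp => if hp < x then max a hp else a) a := by
  rw [List.foldl_filter]
  induction l generalizing a with
  | nil => rfl
  | cons hd t ih =>
    simp only [List.foldl_cons]
    by_cases h : hd = x
    · subst h; simp [ih]
    · simp [h, ih]

theorem foldl_minIf_filter (x : Int) (l : List Int) (b : Int) :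
    l.foldl (fun b hp => if x < hp then min b hp else b) b
    = (l.filter (fun hp => hp ≠ x)).foldl (fun b hp => if x < hp then min b hp else b) b := by
  rw [List.foldl_filter]
  induction l generalizing b with
  | nil => rfl
  | cons hd t ih =>
    simp only [List.foldl_cons]
    by_cases h : hd = x
    · subst h; simp [ih]
    · simp [h, ih]

-- ===== VERDICT (by name: the statement is the Claim_ definition above) =====
theorem find_blocking_pos_spec : Claim_equal_find_blocking_pos := by
  unfold Claim_equal_find_blocking_pos
  intro hallway_pos amphipod _
  unfold Spec_find_blocking_pos find_blocking_pos find_blocking_pos_alt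
  set x := amphipod.1 with hx
  set ys := PySem.List.sorted (hallway_pos.filter (fun hp => hp ≠ x)) (fun v => v) with hys
  set i := PySem.List.bisectLeft ys x with hi
  have hperm : ys.Perm (hallway_pos.filter (fun hp => hp ≠ x)) :=
    PySem.List.sorted_perm _ _ _
  have hpair : ys.Pairwise (fun a b => a ≤ b) :=
    PySem.List.sorted_pairwise (hallway_pos.filter (fun hp => hp ≠ x)) (fun v => v)
  obtain ⟨hile, hlt, hge⟩ := PySem.List.bisectLeft_spec ys x hpair
  have hmono : ∀ (p q : Nat) (hp : p < ys.length) (hq : q < ys.length), p ≤ q → ys[p] ≤ ys[q] := by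
    intro p q hp hq hpq
    rcases Nat.lt_or_ge p q with h | h
    · exact (List.pairwise_iff_getElem.mp hpair) p q hp hq h
    · have : p = q := by omega
      subst this; rfl
  have hne : ∀ y ∈ ys, y ≠ x := by
    intro y hy
    have : y ∈ hallway_pos.filter (fun hp => hp ≠ x) := hperm.mem_iff.mp hy
    simpa using (List.of_mem_filter this)
  -- rewrite A's fold into the two component folds
  rw [foldA_split]
  -- move both component folds from hallway_pos to ys
  haveI rcMax : RightCommutative (fun (a : Int) hp => if hp < x then max a hp else a) :=
    ⟨by intro a b c; split_ifs <;> omega⟩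
  haveI rcMin : RightCommutative (fun (b : Int) hp => if x < hp then min b hp else b) :=
    ⟨by intro a b c; split_ifs <;> omega⟩
  rw [foldl_maxIf_filter x, foldl_minIf_filter x,
    ← hperm.foldl_eq (-1 : Int), ← hperm.foldl_eq (11 : Int)]
  -- split ys at the insertion point i
  have hsplit : ys = ys.take i ++ ys.drop i := (List.take_append_drop i ys).symm
  have hmem_take : ∀ y ∈ ys.take i, y < x := by
    intro y hy
    obtain ⟨j, hj, hjy⟩ := List.getElem_of_mem hy
    simp only [List.length_take] at hj
    have hjlen : j < ys.length := by omega
    have hji : j < i := by omega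
    have : (ys.take i)[j] = ys[j] := List.getElem_take
    rw [← hjy, this]
    exact hlt j hjlen hji
  have hmem_drop : ∀ y ∈ ys.drop i, x < y := by
    intro y hy
    obtain ⟨j, hj, hjy⟩ := List.getElem_of_mem hy
    simp only [List.length_drop] at hj
    have hjlen : i + j < ys.length := by omega
    have : (ys.drop i)[j] = ys[i + j] := List.getElem_drop
    have hyv : y = ys[i + j] := by rw [← hjy, this]
    have hxy : x ≤ ys[i + j] := hge (i + j) hjlen (by omega)
    have hney : ys[i + j] ≠ x := hne _ (List.getElem_mem _)
    omega
  -- evaluate the max-side fold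
  have hmax : ys.foldl (fun a hp => if hp < x then max a hp else a) (-1)
      = (if 0 < i ∧ -1 < ys.getD (i - 1) 0 then ys.getD (i - 1) 0 else -1) := by
    conv_lhs => rw [hsplit]
    rw [List.foldl_append]
    rw [PySem.List.foldl_congr_mem (ys.take i) _ (fun a hp => max a hp) (-1)
      (by intro a y hy; simp [hmem_take y hy])]
    rw [PySem.List.foldl_congr_mem (ys.drop i) _ (fun a _ => a) _
      (by intro a y hy; have := hmem_drop y hy; simp; omega)]
    rw [List.foldl_fixed]
    rcases Nat.eq_zero_or_pos i with h0 | hpos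
    · simp [h0]
    · have hi1 : i - 1 < ys.length := by omega
      have hgd : ys.getD (i - 1) 0 = ys[i - 1] := List.getD_eq_getElem ys 0 hi1
      have hmemt : ys[i - 1] ∈ ys.take i := by
        rw [List.mem_take_iff_getElem]
        exact ⟨i - 1, by omega, rfl⟩
      have hub : ∀ y ∈ ys.take i, y ≤ ys[i - 1] := by
        intro y hy
        obtain ⟨j, hj, hjy⟩ := List.getElem_of_mem hy
        simp only [List.length_take] at hj
        have : (ys.take i)[j] = ys[j] := List.getElem_take
        rw [← hjy, this]
        exact hmono j (i - 1) (by omega) hi1 (by omega)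
      rw [foldl_max_mem_ub (ys.take i) (-1) ys[i - 1] hmemt hub, hgd]
      split_ifs <;> omega
  -- evaluate the min-side fold
  have hmin : ys.foldl (fun b hp => if x < hp then min b hp else b) 11
      = (if i < ys.length ∧ ys.getD i 0 < 11 then ys.getD i 0 else 11) := by
    conv_lhs => rw [hsplit]
    rw [List.foldl_append]
    rw [PySem.List.foldl_congr_mem (ys.take i) _ (fun b _ => b) (11 : Int)
      (by intro b y hy; have := hmem_take y hy; simp; omega)]
    rw [List.foldl_fixed]
    rw [PySem.List.foldl_congr_mem (ys.drop i) _ (fun b hp => min b hp) (11 : Int)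
      (by intro b y hy; simp [hmem_drop y hy])]
    rcases Nat.lt_or_ge i ys.length with hlen | hlen
    · have hgd : ys.getD i 0 = ys[i] := List.getD_eq_getElem ys 0 hlen
      have hmemd : ys[i] ∈ ys.drop i := by
        rw [List.mem_drop_iff_getElem]
        exact ⟨0, by omega, by simp⟩
      have hlb : ∀ y ∈ ys.drop i, ys[i] ≤ y := by
        intro y hy
        obtain ⟨j, hj, hjy⟩ := List.getElem_of_mem hy
        simp only [List.length_drop] at hj
        have hjlen : i + j < ys.length := by omega
        have : (ys.drop i)[j] = ys[i + j] := List.getElem_drop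
        rw [← hjy, this]
        exact hmono i (i + j) hlen hjlen (by omega)
      rw [foldl_min_mem_lb (ys.drop i) 11 ys[i] hmemd hlb, hgd]
      split_ifs <;> omega
    · have : ys.drop i = [] := List.drop_eq_nil_of_le hlen
      rw [this]
      simp
      omega
  rw [hmax, hmin]
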